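-- pv_equiv track=rewrite | github.com/Aghilzoori/My-projects | bot_Persian_Empire/bot_Persian_Empire_2025_11_24/src/tools.py | needs_internet_search_en_v4
-- ===== SOURCE A (Python) =====
-- def needs_internet_search_en_v4(text):
--     """
--     Smarter English-only check for internet search necessity.
--     - Uses substring matching
--     - Handles multi-word keywords more robustly
--     - Considers question, keywords, and sentence length
--     """
--     text_lower = text.lower().strip()
--
--
--     is_question = text_lower.endswith('?') or any(text_lower.startswith(w) for w in ['what','how','who','which','when','where','can you'])
--
--     search_keywords = [
--         'method','tutorial','new','news','statistics','research','study','definition','meaning',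
--         'usage','advantages','disadvantages','history','python','artificial intelligence',
--         'machine learning','data analysis','programming','code','algorithm','functions','class','object',
--         'can you','about'
--     ]
--
--     words = text_lower.split()
--
--     keyword_hits = 0
--     for kw in search_keywords:
--         kw_tokens = kw.split()
--         for i in range(len(words) - len(kw_tokens) + 1):
--             if words[i:i+len(kw_tokens)] == kw_tokens:
--                 keyword_hits += 1
--                 break
--
--
--     score = 0
--     if is_question:
--         score += 1
--     score += keyword_hits * 2
--     if len(words) > 5:
--         score += 1
--
--     return score >= 3
-- ===== SOURCE B (Python) =====
-- def needs_internet_search_en_v4(text):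
--     """Index-then-lookup rewrite: build unigram/bigram sets once, then one
--     membership test per keyword (replaces the per-keyword positional scan)."""
--     text_lower = text.lower().strip()
--
--     is_question = text_lower.endswith('?') or any(
--         text_lower.startswith(w)
--         for w in ['what', 'how', 'who', 'which', 'when', 'where', 'can you'])
--
--     search_keywords = [
--         'method','tutorial','new','news','statistics','research','study','definition','meaning',
--         'usage','advantages','disadvantages','history','python','artificial intelligence',
--         'machine learning','data analysis','programming','code','algorithm','functions','class','object',
--         'can you','about'
--     ]
--
--     words = text_lower.split()
--
--     # one pass over the words: index all unigrams and adjacent bigrams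
--     unigrams = set(words)
--     bigrams = set(zip(words, words[1:]))
--
--     def hit(kw):
--         kts = kw.split()
--         if len(kts) == 1:
--             return kts[0] in unigrams
--         elif len(kts) == 2:
--             return (kts[0], kts[1]) in bigrams
--         return False
--
--     keyword_hits = sum(1 for kw in search_keywords if hit(kw))
--
--     score = (1 if is_question else 0) + 2 * keyword_hits + (1 if len(words) > 5 else 0)
--     return score >= 3
-- ===== Notes on version B (the rewrite author's own statement) =====
-- stated objective: alternative
-- what changed: Replaces the per-keyword positional scan over word slices by a one-pass unigram/bigram set index followed by a single membership test per keyword.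
import Mathlib
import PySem

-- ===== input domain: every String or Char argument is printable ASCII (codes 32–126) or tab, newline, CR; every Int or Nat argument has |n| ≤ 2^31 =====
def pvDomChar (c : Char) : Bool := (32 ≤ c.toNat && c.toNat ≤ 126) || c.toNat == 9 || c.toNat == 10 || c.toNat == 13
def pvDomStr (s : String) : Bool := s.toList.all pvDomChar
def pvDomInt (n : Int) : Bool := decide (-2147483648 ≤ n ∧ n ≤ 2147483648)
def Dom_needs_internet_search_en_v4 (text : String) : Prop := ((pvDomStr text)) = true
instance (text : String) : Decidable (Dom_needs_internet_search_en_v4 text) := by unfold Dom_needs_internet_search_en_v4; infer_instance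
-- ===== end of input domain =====

-- B replaces A's per-keyword positional scan by a one-pass unigram/bigram set index
-- followed by one membership test per keyword (objective: alternative decomposition).


-- ===== PORT A =====
def pvQuestionStarts : List String := ["what","how","who","which","when","where","can you"]

def pvSearchKeywords : List String :=
  ["method","tutorial","new","news","statistics","research","study","definition","meaning",
   "usage","advantages","disadvantages","history","python","artificial intelligence",
   "machine learning","data analysis","programming","code","algorithm","functions","class","object",
   "can you","about"]

def needs_internet_search_en_v4 (text : String) : Bool :=
  let text_lower := PySem.Str.strip (PySem.Str.lower text)
  let is_question :=
    PySem.Str.endswith text_lower "?" ||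
      pvQuestionStarts.any (fun w => PySem.Str.startswith text_lower w)
  let words := PySem.Str.split₀ text_lower
  -- for kw in search_keywords: inner positional scan with break (first hit counts once)
  let keyword_hits : Int :=
    pvSearchKeywords.foldl (fun acc kw =>
      let kw_tokens := PySem.Str.split₀ kw
      if (PySem.List.pyRange 0 ((words.length : Int) - (kw_tokens.length : Int) + 1)).any
           (fun i => PySem.List.slice words (some i) (some (i + (kw_tokens.length : Int))) == kw_tokens)
      then acc + 1 else acc) 0
  let score : Int :=
    (if is_question then (0 : Int) + 1 else 0) + keyword_hits * 2 +
      (if (words.length : Int) > 5 then 1 else 0)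
  decide (score ≥ 3)

-- ===== PORT B =====
def pvHit (unigrams : PySem.Set String) (bigrams : PySem.Set (String × String)) (kw : String) : Bool :=
  let kts := PySem.Str.split₀ kw
  if h1 : kts.length = 1 then
    unigrams.contains kts[0]
  else if h2 : kts.length = 2 then
    bigrams.contains (kts[0], kts[1])
  else false

def needs_internet_search_en_v4_alt (text : String) : Bool :=
  let text_lower := PySem.Str.strip (PySem.Str.lower text)
  let is_question :=
    PySem.Str.endswith text_lower "?" ||
      pvQuestionStarts.any (fun w => PySem.Str.startswith text_lower w)
  let words := PySem.Str.split₀ text_lower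
  -- one pass over the words: index all unigrams and adjacent bigrams
  let unigrams : PySem.Set String := PySem.Set.ofList words
  let bigrams : PySem.Set (String × String) := PySem.Set.ofList (words.zip words.tail)
  let keyword_hits : Nat := pvSearchKeywords.countP (pvHit unigrams bigrams)
  let score : Int :=
    (if is_question then (1 : Int) else 0) + 2 * (keyword_hits : Int) +
      (if (words.length : Int) > 5 then 1 else 0)
  decide (score ≥ 3)

-- ===== PRECONDITION & SPEC =====
def Spec_needs_internet_search_en_v4 (text : String) (out : Bool) : Prop := out = needs_internet_search_en_v4_alt text
instance (text : String) (out : Bool) : Decidable (Spec_needs_internet_search_en_v4 text out) := by unfold Spec_needs_internet_search_en_v4; infer_instance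

-- ===== CLAIM (what is proved, stated in full; the proofs are below) =====
def Claim_equal_needs_internet_search_en_v4 : Prop := ∀ (text : String), Dom_needs_internet_search_en_v4 text → Spec_needs_internet_search_en_v4 text (needs_internet_search_en_v4 text)

-- ===== LEMMAS AND PROOFS =====

-- A's inner scan over start positions finds kts exactly when kts is a contiguous run of words.
theorem pv_scan_eq_infix (words kts : List String) :
    ((PySem.List.pyRange 0 ((words.length : Int) - (kts.length : Int) + 1)).any
      (fun i => PySem.List.slice words (some i) (some (i + (kts.length : Int))) == kts))
    = decide (kts <:+: words) := by
  by_cases h : kts <:+: words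
  · simp only [h, decide_true]
    obtain ⟨s, t, hst⟩ := h
    rw [List.any_eq_true]
    refine ⟨(s.length : Int), ?_, ?_⟩
    · rw [PySem.List.mem_pyRange_one]
      constructor
      · positivity
      · have : words.length = s.length + kts.length + t.length := by
          rw [← hst]; simp; omega
        omega
    · rw [beq_iff_eq, PySem.List.slice_toNat _ (by positivity) (by positivity)]
      have h1 : ((s.length : Int) + (kts.length : Int)).toNat = s.length + kts.length := by omega
      have h2 : ((s.length : Int)).toNat = s.length := by omega
      rw [h1, h2, ← hst, List.append_assoc, List.drop_left]
      have : s.length + kts.length - s.length = kts.length := by omega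
      rw [this, List.take_left]
  · simp only [h, decide_false]
    rw [List.any_eq_false]
    intro i hi
    rw [PySem.List.mem_pyRange_one] at hi
    simp only [beq_iff_eq]
    intro hsl
    rw [PySem.List.slice_toNat _ (by omega) (by omega)] at hsl
    have h1 : ((i + (kts.length : Int))).toNat - i.toNat = kts.length := by omega
    rw [h1] at hsl
    have hp : kts <+: words.drop i.toNat := hsl ▸ List.take_prefix _ _
    exact h (hp.isInfix.trans (List.drop_suffix _ _).isInfix)

theorem pv_pair_infix (a b : String) (words : List String) :
    ([a, b] <:+: words) ↔ (a, b) ∈ words.zip words.tail := by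
  induction words with
  | nil => simp
  | cons w ws ih =>
    rw [List.infix_cons_iff]
    cases ws with
    | nil => simp [List.cons_prefix_cons]
    | cons v vs =>
      simp only [List.tail_cons, List.zip_cons_cons, List.mem_cons, List.cons_prefix_cons] at *
      rw [ih]
      simp [Prod.ext_iff]

theorem pv_keyword_shape :
    ∀ kw ∈ pvSearchKeywords,
      (PySem.Str.split₀ kw).length = 1 ∨ (PySem.Str.split₀ kw).length = 2 := by
  decide

theorem pv_hit_eq (words : List String) (kw : String)
    (h : (PySem.Str.split₀ kw).length = 1 ∨ (PySem.Str.split₀ kw).length = 2) :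
    ((PySem.List.pyRange 0 ((words.length : Int) - ((PySem.Str.split₀ kw).length : Int) + 1)).any
      (fun i => PySem.List.slice words (some i)
                  (some (i + ((PySem.Str.split₀ kw).length : Int))) == PySem.Str.split₀ kw))
    = pvHit (PySem.Set.ofList words) (PySem.Set.ofList (words.zip words.tail)) kw := by
  rw [pv_scan_eq_infix]
  unfold pvHit
  rcases h with h | h
  · obtain ⟨a, ha⟩ := List.length_eq_one_iff.mp h
    simp [ha, List.singleton_infix_iff]
  · obtain ⟨a, b, hab⟩ := List.length_eq_two.mp h
    simp [hab, pv_pair_infix]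

-- ===== VERDICT (by name: the statement is the Claim_ definition above) =====
theorem needs_internet_search_en_v4_spec : Claim_equal_needs_internet_search_en_v4 := by
  intro text _
  unfold Spec_needs_internet_search_en_v4 needs_internet_search_en_v4 needs_internet_search_en_v4_alt
  simp only [PySem.List.foldl_count_if, Int.zero_add]
  rw [List.countP_congr (fun kw hkw => by
    rw [pv_hit_eq _ _ (pv_keyword_shape kw hkw)])]
  simp only [decide_eq_decide]
  split_ifs <;> omega
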